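-- pv_equiv track=rewrite | github.com/xxyun/xxyun-paipai_research_seg_smaller_model | topic_method/helpers/post_process.py | fill_consec_for_each_clique
-- ===== SOURCE A (Python) =====
-- def is_insertable(first_list, second_list):
--     """
--     该函数，用来判断两个列表是否可以插入一个值，使它们成为连续值
--     :param first_list: 第一个有序数列
--     :param second_list:第二个有序数列
--     :return:
--     """
--     # 如果两个列表都只有1个元素，返回False，不插入
--     if len(first_list) <= 1 and len(second_list) <= 1:
--         return False
--     # 如果两个列表中有一个为空，返回False
--     if not first_list or not second_list:
--         return False
--     # 取出两个列表中的第一个元素和最后一个元素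
--     first = first_list[-1]
--     last = second_list[0]
--     # 如果第一个元素和最后一个元素相差1，返回True
--     if abs(first - last) == 2:
--         return True
--     # 否则，返回False
--     return False
--
-- def fill_consec_for_each_clique(lst_item):
--     """
--     对于每个团元素，中间相差一个元素的团填充差值并予以合并（左右至少有一个有2个以上元素）
--     :param lst_item:
--     :return:
--     """
--     # 定义一个变量，存储结果数组
--     result = []
--
--     i = 0
--     while i < len(lst_item)-1:
--
--         # 取出当前元素和下一个元素
--         current_element = lst_item[i]
--         next_element = lst_item[i+1]
--
--         # 判断当前元素和下一个元素是否可以插入一个值，使它们成为连续值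
--         if is_insertable(current_element, next_element):
--             # 如果可以，将当前元素和下一个元素合并为一个列表，并添加到结果数组中
--             merged = current_element + [current_element[-1]+1] + next_element
--             result.append(merged)
--             # 跳过下一个元素的遍历
--             i += 1
--         else:
--             # 如果不可以，将当前元素添加到结果数组中
--             result.append(current_element)
--
--         i += 1
--
--     if i == len(lst_item)-1:
--         result.append(lst_item[i])
--
--     # 打印结果数组
--     return result
-- ===== SOURCE B (Python) =====
-- def is_insertable(first_list, second_list):
--     if len(first_list) <= 1 and len(second_list) <= 1:
--         return False
--     if not first_list or not second_list:
--         return False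
--     first = first_list[-1]
--     last = second_list[0]
--     if abs(first - last) == 2:
--         return True
--     return False
--
--
-- def fill_consec_for_each_clique(lst_item):
--     # Recursive decomposition over the list structure instead of A's index loop.
--     if not lst_item:
--         return []
--     if len(lst_item) == 1:
--         return [lst_item[0]]
--     first, second = lst_item[0], lst_item[1]
--     if is_insertable(first, second):
--         merged = first + [first[-1] + 1] + second
--         return [merged] + fill_consec_for_each_clique(lst_item[2:])
--     return [first] + fill_consec_for_each_clique(lst_item[1:])
-- ===== Notes on version B (the rewrite author's own statement) =====
-- stated objective: simpler
-- what changed: Replaced A's index-based while loop with explicit skip bookkeeping and a trailing 'if i == len-1' append by a direct structural recursion on the list (match on first two cliques, merge or keep the head, recurse on the rest), which makes the greedy non-overlapping merge and the tail handling implicit.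
import Mathlib
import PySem

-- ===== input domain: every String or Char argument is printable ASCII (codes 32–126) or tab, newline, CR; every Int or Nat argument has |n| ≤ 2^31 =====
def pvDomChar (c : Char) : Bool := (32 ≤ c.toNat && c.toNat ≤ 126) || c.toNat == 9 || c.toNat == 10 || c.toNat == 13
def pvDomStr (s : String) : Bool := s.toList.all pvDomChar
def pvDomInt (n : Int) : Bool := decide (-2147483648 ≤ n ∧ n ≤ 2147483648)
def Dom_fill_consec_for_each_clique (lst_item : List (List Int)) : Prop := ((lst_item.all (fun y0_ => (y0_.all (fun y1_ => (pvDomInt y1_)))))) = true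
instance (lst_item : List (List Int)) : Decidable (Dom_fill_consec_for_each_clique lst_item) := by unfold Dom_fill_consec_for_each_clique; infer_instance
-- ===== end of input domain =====

-- B replaces A's index-based while loop by a structural recursion on the list; same return value, no speed claim.

-- ===== PORT A =====
-- shared helper: literal port of is_insertable (used verbatim by both Pythons)
def is_insertable (first_list second_list : List Int) : Bool :=
  if first_list.length ≤ 1 ∧ second_list.length ≤ 1 then false
  else if first_list.isEmpty ∨ second_list.isEmpty then false
  else
    -- both lists are nonempty here, so the Python indexing cannot raise; getD 0 is never used
    let first := (PySem.List.pyGet? first_list (-1)).getD 0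
    let last := (PySem.List.pyGet? second_list 0).getD 0
    if (first - last).natAbs = 2 then true else false

-- the while loop of A, with i and result as the loop state
def fillLoopA (lst_item : List (List Int)) (i : Nat) (result : List (List Int)) : List (List Int) :=
  if _h : (i : Int) < (lst_item.length : Int) - 1 then
    let current_element := (PySem.List.pyGet? lst_item (i : Int)).getD []
    let next_element := (PySem.List.pyGet? lst_item ((i : Int) + 1)).getD []
    if is_insertable current_element next_element then
      fillLoopA lst_item (i + 2)
        (result ++ [current_element ++ [(PySem.List.pyGet? current_element (-1)).getD 0 + 1] ++ next_element])
    else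
      fillLoopA lst_item (i + 1) (result ++ [current_element])
  else if (i : Int) = (lst_item.length : Int) - 1 then
    result ++ [(PySem.List.pyGet? lst_item (i : Int)).getD []]
  else
    result
termination_by lst_item.length - i
decreasing_by all_goals omega

def fill_consec_for_each_clique (lst_item : List (List Int)) : List (List Int) :=
  fillLoopA lst_item 0 []

-- ===== PORT B =====
def fill_consec_for_each_clique_alt : List (List Int) → List (List Int)
  | [] => []
  | [a] => [a]
  | first :: second :: rest =>
    if is_insertable first second then
      (first ++ [(PySem.List.pyGet? first (-1)).getD 0 + 1] ++ second)
        :: fill_consec_for_each_clique_alt rest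
    else
      first :: fill_consec_for_each_clique_alt (second :: rest)

-- ===== PRECONDITION & SPEC =====
def Spec_fill_consec_for_each_clique (lst_item : List (List Int)) (out : List (List Int)) : Prop := out = fill_consec_for_each_clique_alt lst_item
instance (lst_item : List (List Int)) (out : List (List Int)) : Decidable (Spec_fill_consec_for_each_clique lst_item out) := by unfold Spec_fill_consec_for_each_clique; infer_instance

-- ===== CLAIM (what is proved, stated in full; the proofs are below) =====
def Claim_equal_fill_consec_for_each_clique : Prop := ∀ (lst_item : List (List Int)), Dom_fill_consec_for_each_clique lst_item → Spec_fill_consec_for_each_clique lst_item (fill_consec_for_each_clique lst_item)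

-- ===== LEMMAS AND PROOFS =====

-- loop invariant: from position i, A's loop appends exactly B's value on the remaining suffix
theorem fillLoopA_eq (lst_item : List (List Int)) :
    ∀ (n i : Nat) (result : List (List Int)), lst_item.length ≤ i + n →
      fillLoopA lst_item i result
        = result ++ fill_consec_for_each_clique_alt (lst_item.drop i) := by
  intro n
  induction n with
  | zero =>
    intro i result hn
    rw [fillLoopA, dif_neg (by omega), if_neg (by omega),
      List.drop_eq_nil_of_le (by omega), fill_consec_for_each_clique_alt]
    simp
  | succ n ih =>
    intro i result hn
    rw [fillLoopA]
    by_cases h : (i : Int) < (lst_item.length : Int) - 1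
    · have hi : i < lst_item.length := by omega
      have hi1 : i + 1 < lst_item.length := by omega
      have e1 : PySem.List.pyGet? lst_item (i : Int) = some lst_item[i] := by
        rw [PySem.List.pyGet?_natCast]; exact List.getElem?_eq_getElem hi
      have e2 : PySem.List.pyGet? lst_item ((i : Int) + 1) = some lst_item[i + 1] := by
        have hc : ((i : Int) + 1) = ((i + 1 : Nat) : Int) := by push_cast; ring
        rw [hc, PySem.List.pyGet?_natCast]; exact List.getElem?_eq_getElem hi1
      rw [dif_pos h]
      simp only [e1, e2, Option.getD_some]
      rw [List.drop_eq_getElem_cons hi, List.drop_eq_getElem_cons hi1,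
        fill_consec_for_each_clique_alt]
      by_cases hins : is_insertable lst_item[i] lst_item[i + 1]
      · rw [if_pos hins, if_pos hins, ih (i + 2) _ (by omega)]
        simp
      · rw [if_neg hins, if_neg hins, ih (i + 1) _ (by omega),
          List.drop_eq_getElem_cons hi1]
        simp
    · rw [dif_neg h]
      by_cases he : (i : Int) = (lst_item.length : Int) - 1
      · have hi : i < lst_item.length := by omega
        have e1 : PySem.List.pyGet? lst_item (i : Int) = some lst_item[i] := by
          rw [PySem.List.pyGet?_natCast]; exact List.getElem?_eq_getElem hi
        have hdrop : lst_item.drop i = [lst_item[i]] := by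
          rw [List.drop_eq_getElem_cons hi, List.drop_eq_nil_of_le (by omega)]
        rw [if_pos he, e1, Option.getD_some, hdrop, fill_consec_for_each_clique_alt]
      · rw [if_neg he, List.drop_eq_nil_of_le (by omega), fill_consec_for_each_clique_alt]
        simp

-- ===== VERDICT (by name: the statement is the Claim_ definition above) =====
theorem fill_consec_for_each_clique_spec : Claim_equal_fill_consec_for_each_clique := by
  intro lst_item _
  unfold Spec_fill_consec_for_each_clique fill_consec_for_each_clique
  rw [fillLoopA_eq lst_item lst_item.length 0 [] (by omega)]
  simp
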